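-- pv_equiv track=rewrite | github.com/N0r01/specter-fansub-tools | credits/credits_svg.py | alt_row_color_drawpath
-- ===== SOURCE A (Python) =====
-- cell_H_padding = 12
--
-- cell_height = 36
--
-- cell_lheight = 21
--
-- def calc_row_height(row):
--     num_subrows = max(len(row[0]),len(row[1]))
--     return 0 if num_subrows == 0 else cell_height + cell_lheight * (num_subrows-1)
--
-- def alt_row_color_drawpath(creditstruct,width,lhs_width,doc_height):
--     retval = []
--     ycursor = 0
--     if creditstruct != None and len(creditstruct) > 0:
--         for idx, row in enumerate(creditstruct):
--             height = cell_height if idx == 0 else calc_row_height(row)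
--             if idx % 2 == 1:
--                 retval.append(f"M 0 {str(ycursor)} L 0 {str(ycursor+height)} {str(width)} {str(ycursor+height)} {str(width)} {str(ycursor)} z")
--             ycursor = ycursor + height
--         mline_x = lhs_width + cell_H_padding * 2
--         retval.append(f"M {str(mline_x)} {str(cell_height)} L {str(mline_x)} {str(doc_height)}")
--     return " ".join(retval)
-- ===== SOURCE B (Python) =====
-- cell_H_padding = 12
--
-- cell_height = 36
--
-- cell_lheight = 21
--
-- def calc_row_height(row):
--     num_subrows = max(len(row[0]), len(row[1]))
--     return 0 if num_subrows == 0 else cell_height + cell_lheight * (num_subrows - 1)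
--
-- def alt_row_color_drawpath(creditstruct, width, lhs_width, doc_height):
--     if not creditstruct:
--         return ""
--     # heights per row: first row is always cell_height, the rest use calc_row_height
--     heights = [cell_height] + [calc_row_height(r) for r in creditstruct[1:]]
--     # prefix sums: start offset of each row
--     starts = []
--     acc = 0
--     for h in heights:
--         starts.append(acc)
--         acc += h
--     paths = [f"M 0 {s} L 0 {s + h} {width} {s + h} {width} {s} z"
--              for i, (s, h) in enumerate(zip(starts, heights)) if i % 2 == 1]
--     mline_x = lhs_width + cell_H_padding * 2
--     paths.append(f"M {mline_x} {cell_height} L {mline_x} {doc_height}")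
--     return " ".join(paths)
-- ===== Notes on version B (the rewrite author's own statement) =====
-- stated objective: alternative
-- what changed: Replaces A's single stateful loop (running y-cursor + conditional append) by a pipeline: build the per-row heights list, compute start offsets as a prefix sum, then emit the odd-indexed paths with a filtered comprehension over zip(starts, heights).
import Mathlib
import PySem

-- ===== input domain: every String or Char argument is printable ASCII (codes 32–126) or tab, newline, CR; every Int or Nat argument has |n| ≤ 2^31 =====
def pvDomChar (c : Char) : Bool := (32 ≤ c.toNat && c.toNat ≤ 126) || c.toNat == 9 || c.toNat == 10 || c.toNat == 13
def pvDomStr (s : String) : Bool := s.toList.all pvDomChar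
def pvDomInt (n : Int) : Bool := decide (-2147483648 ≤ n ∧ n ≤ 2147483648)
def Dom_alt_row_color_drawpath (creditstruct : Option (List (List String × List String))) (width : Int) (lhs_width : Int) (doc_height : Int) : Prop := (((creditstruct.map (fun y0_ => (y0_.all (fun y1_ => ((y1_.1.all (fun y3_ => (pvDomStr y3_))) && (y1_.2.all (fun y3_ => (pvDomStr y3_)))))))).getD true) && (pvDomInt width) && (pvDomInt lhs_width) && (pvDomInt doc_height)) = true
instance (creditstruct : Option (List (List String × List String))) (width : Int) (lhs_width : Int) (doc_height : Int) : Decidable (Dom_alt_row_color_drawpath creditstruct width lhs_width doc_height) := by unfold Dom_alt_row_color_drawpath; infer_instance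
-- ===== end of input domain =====

-- B replaces A's stateful cursor loop by a heights list, a prefix-sum of start offsets,
-- and a filtered comprehension over their zip (objective: alternative decomposition).

-- module constants (shared by both Python versions)
def cell_H_padding : Int := 12
def cell_height : Int := 36
def cell_lheight : Int := 21

-- module helper calc_row_height (identical in both Python files)
def calc_row_height (row : List String × List String) : Int :=
  let num_subrows : Int := max (PySem.List.len row.1) (PySem.List.len row.2)
  if num_subrows == 0 then 0 else cell_height + cell_lheight * (num_subrows - 1)

-- ===== PORT A =====
-- the f-string of A's loop body
def pvFmtA (width ycursor height : Int) : String :=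
  "M 0 " ++ PySem.Int.toStr ycursor ++ " L 0 " ++ PySem.Int.toStr (ycursor + height) ++ " " ++
    PySem.Int.toStr width ++ " " ++ PySem.Int.toStr (ycursor + height) ++ " " ++
    PySem.Int.toStr width ++ " " ++ PySem.Int.toStr ycursor ++ " z"

-- the middle-line f-string of A
def pvMlineA (mline_x doc_height : Int) : String :=
  "M " ++ PySem.Int.toStr mline_x ++ " " ++ PySem.Int.toStr cell_height ++ " L " ++
    PySem.Int.toStr mline_x ++ " " ++ PySem.Int.toStr doc_height

def alt_row_color_drawpath (creditstruct : Option (List (List String × List String))) (width : Int) (lhs_width : Int) (doc_height : Int) : String :=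
  let retval : List String := []
  match creditstruct with
  | none => PySem.Str.join " " retval
  | some rows =>
    if PySem.List.len rows > 0 then
      let st := (PySem.List.enumerate rows 0).foldl
        (fun (st : List String × Int) p =>
          let idx := p.1
          let row := p.2
          let height := if idx == 0 then cell_height else calc_row_height row
          let retval := if PySem.Int.mod idx 2 == 1 then st.1 ++ [pvFmtA width st.2 height] else st.1
          (retval, st.2 + height)) (retval, 0)
      let mline_x := lhs_width + cell_H_padding * 2
      PySem.Str.join " " (st.1 ++ [pvMlineA mline_x doc_height])
    else
      PySem.Str.join " " retval

-- ===== PORT B =====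
-- the path f-string of B's comprehension (same format string as A writes)
def pvFmtB (width s h : Int) : String :=
  "M 0 " ++ PySem.Int.toStr s ++ " L 0 " ++ PySem.Int.toStr (s + h) ++ " " ++
    PySem.Int.toStr width ++ " " ++ PySem.Int.toStr (s + h) ++ " " ++
    PySem.Int.toStr width ++ " " ++ PySem.Int.toStr s ++ " z"

def pvMlineB (mline_x doc_height : Int) : String :=
  "M " ++ PySem.Int.toStr mline_x ++ " " ++ PySem.Int.toStr cell_height ++ " L " ++
    PySem.Int.toStr mline_x ++ " " ++ PySem.Int.toStr doc_height

def alt_row_color_drawpath_alt (creditstruct : Option (List (List String × List String))) (width : Int) (lhs_width : Int) (doc_height : Int) : String :=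
  match creditstruct with
  | none => ""
  | some rows =>
    if rows = [] then ""
    else
      -- heights = [cell_height] + [calc_row_height(r) for r in creditstruct[1:]]
      let heights : List Int :=
        [cell_height] ++ (PySem.List.slice rows (some 1) none).map calc_row_height
      -- starts: prefix-sum loop (starts.append(acc); acc += h)
      let sa := heights.foldl (fun (sa : List Int × Int) h => (sa.1 ++ [sa.2], sa.2 + h)) ([], 0)
      let starts := sa.1
      -- filtered comprehension over enumerate(zip(starts, heights))
      let paths : List String :=
        (PySem.List.enumerate (starts.zip heights) 0).filterMap
          (fun p => if PySem.Int.mod p.1 2 == 1 then some (pvFmtB width p.2.1 p.2.2) else none)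
      let mline_x := lhs_width + cell_H_padding * 2
      PySem.Str.join " " (paths ++ [pvMlineB mline_x doc_height])

-- ===== PRECONDITION & SPEC =====
def Spec_alt_row_color_drawpath (creditstruct : Option (List (List String × List String))) (width : Int) (lhs_width : Int) (doc_height : Int) (out : String) : Prop := out = alt_row_color_drawpath_alt creditstruct width lhs_width doc_height
instance (creditstruct : Option (List (List String × List String))) (width : Int) (lhs_width : Int) (doc_height : Int) (out : String) : Decidable (Spec_alt_row_color_drawpath creditstruct width lhs_width doc_height out) := by unfold Spec_alt_row_color_drawpath; infer_instance

-- ===== CLAIM (what is proved, stated in full; the proofs are below) =====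
def Claim_equal_alt_row_color_drawpath : Prop := ∀ (creditstruct : Option (List (List String × List String))) (width : Int) (lhs_width : Int) (doc_height : Int), Dom_alt_row_color_drawpath creditstruct width lhs_width doc_height → Spec_alt_row_color_drawpath creditstruct width lhs_width doc_height (alt_row_color_drawpath creditstruct width lhs_width doc_height)

-- ===== LEMMAS AND PROOFS =====

-- abstract shape both sides reduce to: path pieces for heights hs, indices from idx, cursor from y
def pvChunks (width : Int) (idx y : Int) : List Int → List String
  | [] => []
  | h :: t =>
    (if PySem.Int.mod idx 2 == 1 then [pvFmtB width y h] else []) ++ pvChunks width (idx + 1) (y + h) t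

theorem pvFmtA_eq (width y h : Int) : pvFmtA width y h = pvFmtB width y h := rfl

-- A's loop over enumerate, started at any index idx ≥ 1, produces pvChunks
theorem pvA_loop (width : Int) (rows : List (List String × List String)) :
    ∀ (idx : Int), 1 ≤ idx → ∀ (acc : List String) (y : Int),
    ((PySem.List.enumerate rows idx).foldl
      (fun (st : List String × Int) p =>
        ((if PySem.Int.mod p.1 2 == 1 then
            st.1 ++ [pvFmtA width st.2 (if p.1 == 0 then cell_height else calc_row_height p.2)]
          else st.1),
          st.2 + (if p.1 == 0 then cell_height else calc_row_height p.2))) (acc, y)).1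
      = acc ++ pvChunks width idx y (rows.map calc_row_height) := by
  induction rows with
  | nil => intro idx _ acc y; simp [PySem.List.enumerate_nil, pvChunks]
  | cons r t ih =>
    intro idx hidx acc y
    rw [PySem.List.enumerate_cons]
    have h0 : (idx == 0) = false := by simp; omega
    simp only [List.foldl_cons, List.map_cons, pvChunks, h0, Bool.false_eq_true, if_false]
    rw [ih (idx + 1) (by omega)]
    simp only [pvFmtA_eq]
    split <;> simp

-- B's prefix-sum starts list
def pvStarts (y : Int) : List Int → List Int
  | [] => []
  | h :: t => y :: pvStarts (y + h) t

theorem pvB_starts (hs : List Int) : ∀ (pre : List Int) (y : Int),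
    (hs.foldl (fun (sa : List Int × Int) h => (sa.1 ++ [sa.2], sa.2 + h)) (pre, y)).1
      = pre ++ pvStarts y hs := by
  induction hs with
  | nil => intro pre y; simp [pvStarts]
  | cons h t ih => intro pre y; simp [pvStarts, ih (pre ++ [y]) (y + h)]

-- B's filtered comprehension over the zip produces pvChunks
theorem pvB_paths (width : Int) (hs : List Int) : ∀ (idx y : Int),
    (PySem.List.enumerate ((pvStarts y hs).zip hs) idx).filterMap
      (fun p => if PySem.Int.mod p.1 2 == 1 then some (pvFmtB width p.2.1 p.2.2) else none)
      = pvChunks width idx y hs := by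
  induction hs with
  | nil => intro idx y; simp [pvStarts, pvChunks, PySem.List.enumerate_nil]
  | cons h t ih =>
    intro idx y
    simp only [pvStarts, List.zip_cons_cons, PySem.List.enumerate_cons, List.filterMap_cons,
      pvChunks]
    rw [ih (idx + 1) (y + h)]
    rcases Bool.eq_false_or_eq_true (PySem.Int.mod idx 2 == 1) with hm | hm <;>
      simp only [hm, Bool.false_eq_true, if_false, if_true, List.nil_append, List.singleton_append]

-- ===== VERDICT (by name: the statement is the Claim_ definition above) =====
theorem alt_row_color_drawpath_spec : Claim_equal_alt_row_color_drawpath := by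
  intro creditstruct width lhs_width doc_height _
  unfold Spec_alt_row_color_drawpath alt_row_color_drawpath alt_row_color_drawpath_alt
  match creditstruct with
  | none => simp [PySem.Str.join]
  | some rows =>
    match rows with
    | [] => simp [PySem.Str.join, PySem.List.len]
    | r :: t =>
      have hlen : PySem.List.len (r :: t) > 0 := by simp [PySem.List.len_eq]
      have hslice : PySem.List.slice (r :: t) (some 1) none = t := by
        rw [PySem.List.slice_from_one]; rfl
      simp only [hlen, if_pos, reduceCtorEq, ite_false, hslice, PySem.List.enumerate_cons,
        List.foldl_cons,
        show ((0:Int) == 0) = true from rfl,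
        show (PySem.Int.mod 0 2 == 1) = false from rfl, Bool.false_eq_true,
        zero_add, List.singleton_append]
      rw [pvA_loop width t 1 (by omega) [] cell_height]
      rw [pvB_starts (t.map calc_row_height) ([] ++ [0]) cell_height]
      simp only [List.nil_append, List.cons_append, List.zip_cons_cons,
        PySem.List.enumerate_cons, List.filterMap_cons,
        show (PySem.Int.mod 0 2 == 1) = false from rfl, Bool.false_eq_true, if_false, zero_add]
      rw [pvB_paths width (t.map calc_row_height) 1 cell_height]
      rfl
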